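-- pv_equiv track=rewrite | github.com/F1NALTV/SudukoSolver1 | main.py | numElim
-- ===== SOURCE A (Python) =====
-- def checkList(num, l):
--     if num in l:
--         return True
--     else:
--         return False
--
-- def numElim(posN, l):
--     nums = list(posN)
--     for x in range(9):
--         num = x + 1
--         if checkList(num, l):
--             if num in nums:
--                 nums.remove(num)
--     return nums
-- ===== SOURCE B (Python) =====
-- def numElim(posN, l):
--     targets = set(l) & set(range(1, 10))
--     removed = set()
--     out = []
--     for x in posN:
--         if x in targets and x not in removed:
--             removed.add(x)
--         else:
--             out.append(x)
--     return out
-- ===== Notes on version B (the rewrite author's own statement) =====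
-- stated objective: alternative
-- what changed: Instead of looping over 1..9 and calling list.remove (an inner scan) per removable digit, B builds the removal-target set once and makes a single pass over posN, skipping the first occurrence of each target and appending everything else.
import Mathlib
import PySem

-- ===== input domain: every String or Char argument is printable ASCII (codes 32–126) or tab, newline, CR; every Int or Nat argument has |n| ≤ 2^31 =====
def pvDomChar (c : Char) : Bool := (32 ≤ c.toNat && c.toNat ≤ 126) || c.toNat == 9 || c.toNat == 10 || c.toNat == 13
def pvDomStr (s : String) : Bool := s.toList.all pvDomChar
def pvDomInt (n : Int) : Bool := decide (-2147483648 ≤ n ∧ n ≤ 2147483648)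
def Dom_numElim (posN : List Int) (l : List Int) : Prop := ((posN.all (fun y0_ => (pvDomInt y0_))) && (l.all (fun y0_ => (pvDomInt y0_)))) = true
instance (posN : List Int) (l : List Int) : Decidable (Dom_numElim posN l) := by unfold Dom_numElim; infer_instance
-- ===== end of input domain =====

-- B replaces A's loop over 1..9 with list.remove scans by one pass over posN with a target set; same return value, proved equivalent.

-- ===== PORT A =====
def checkList (num : Int) (l : List Int) : Bool :=
  if l.contains num then true else false

def numElim (posN : List Int) (l : List Int) : List Int :=
  let nums := posN
  (PySem.List.pyRange 0 9 1).foldl (fun nums x =>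
    let num := x + 1
    if checkList num l then
      if nums.contains num then
        -- nums.remove(num): guarded by 'num in nums', so the Option is some; getD is exact here
        (PySem.List.remove? nums num).getD nums
      else nums
    else nums) nums

-- ===== PORT B =====
def numElimGo (targets : PySem.Set Int) : List Int → PySem.Set Int → List Int
  | [], _ => []
  | x :: xs, removed =>
    if PySem.Set.contains targets x && !(PySem.Set.contains removed x) then
      numElimGo targets xs (PySem.Set.add removed x)
    else
      x :: numElimGo targets xs removed

def numElim_alt (posN : List Int) (l : List Int) : List Int :=
  let targets := PySem.Set.inter (PySem.Set.ofList l) (PySem.Set.ofList (PySem.List.pyRange 1 10 1))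
  numElimGo targets posN PySem.Set.empty

-- ===== PRECONDITION & SPEC =====
def Spec_numElim (posN : List Int) (l : List Int) (out : List Int) : Prop := out = numElim_alt posN l
instance (posN : List Int) (l : List Int) (out : List Int) : Decidable (Spec_numElim posN l out) := by unfold Spec_numElim; infer_instance

-- ===== CLAIM (what is proved, stated in full; the proofs are below) =====
def Claim_equal_numElim : Prop := ∀ (posN : List Int) (l : List Int), Dom_numElim posN l → Spec_numElim posN l (numElim posN l)

-- ===== LEMMAS AND PROOFS =====

-- Erasing values from [] gives [].
theorem foldl_erase_nil (S : List Int) : S.foldl (fun ns v => ns.erase v) ([] : List Int) = [] := by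
  induction S with
  | nil => rfl
  | cons s S ih => simpa using ih

-- Erasing values none of which is the head keeps the head.
theorem foldl_erase_not_mem (S : List Int) (x : Int) (xs : List Int) (hx : x ∉ S) :
    S.foldl (fun ns v => ns.erase v) (x :: xs) = x :: S.foldl (fun ns v => ns.erase v) xs := by
  induction S generalizing xs with
  | nil => rfl
  | cons s S ih =>
    have hxs : x ≠ s := fun h => hx (h ▸ List.mem_cons_self)
    have hxS : x ∉ S := fun h => hx (List.mem_cons_of_mem _ h)
    have h1 : (x :: xs).erase s = x :: xs.erase s := by
      simp [hxs]
    simp only [List.foldl_cons, h1]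
    exact ih _ hxS

-- foldl of erase is invariant under permutation of the erased values.
theorem foldl_erase_perm {S T : List Int} (h : S.Perm T) (xs : List Int) :
    S.foldl (fun ns v => ns.erase v) xs = T.foldl (fun ns v => ns.erase v) xs := by
  induction h generalizing xs with
  | nil => rfl
  | cons a _ ih => simp only [List.foldl_cons]; exact ih _
  | swap a b => simp only [List.foldl_cons, List.erase_comm]
  | trans _ _ ih1 ih2 => exact (ih1 _).trans (ih2 _)

-- A conditional fold equals the fold over the filtered list.
theorem foldl_if_filter (p : Int → Bool) (S : List Int) (xs : List Int) :
    S.foldl (fun ns v => if p v then ns.erase v else ns) xs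
      = (S.filter p).foldl (fun ns v => ns.erase v) xs := by
  induction S generalizing xs with
  | nil => rfl
  | cons s S ih =>
    by_cases h : p s = true
    · simp [h, ih]
    · simp [h, ih]

-- Each step of A's loop is the guarded erase.
theorem numElim_step (ns : List Int) (l : List Int) (num : Int) :
    (if checkList num l then
       if ns.contains num then (PySem.List.remove? ns num).getD ns else ns
     else ns)
      = (if l.contains num then ns.erase num else ns) := by
  unfold checkList
  by_cases hl : num ∈ l
  · by_cases hn : num ∈ ns
    · simp [hl, hn, PySem.List.remove?_eq_some_erase ns num hn]
    · simp [hl, hn, List.erase_of_not_mem hn]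
  · simp [hl]

-- A computes the fold of erase over the digits 1..9 that occur in l.
theorem numElim_eq_fold (posN l : List Int) :
    numElim posN l
      = ((PySem.List.pyRange 1 10 1).filter (fun v => l.contains v)).foldl
          (fun ns v => ns.erase v) posN := by
  unfold numElim
  rw [← foldl_if_filter]
  have h1 : PySem.List.pyRange 0 9 1 = [0,1,2,3,4,5,6,7,8] := by decide
  have h2 : PySem.List.pyRange 1 10 1 = [1,2,3,4,5,6,7,8,9] := by decide
  simp only [h1, h2, List.foldl_cons, List.foldl_nil, numElim_step]
  norm_num

-- B's loop equals the fold of erase over the still-unremoved targets.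
theorem numElimGo_eq_fold (T : List Int) (hT : T.Nodup) :
    ∀ (xs rem : List Int),
      numElimGo T xs rem
        = (T.filter (fun v => !rem.contains v)).foldl (fun ns v => ns.erase v) xs := by
  intro xs
  induction xs with
  | nil => intro rem; exact (foldl_erase_nil _).symm
  | cons x xs ih =>
    intro rem
    by_cases hxT : x ∈ T
    · by_cases hxr : x ∈ rem
      · -- x is a target already removed once: it is kept
        have hxP : x ∉ T.filter (fun v => !rem.contains v) := by
          simp [List.mem_filter, hxr]
        rw [numElimGo, if_neg (by simp [PySem.Set.contains_iff, hxr]), ih rem,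
            foldl_erase_not_mem _ _ _ hxP]
      · -- first occurrence of a target: dropped
        have hadd : PySem.Set.add rem x = rem ++ [x] := by
          simp [PySem.Set.add, hxr]
        have hxP : x ∈ T.filter (fun v => !rem.contains v) := by
          simp [List.mem_filter, hxT, hxr]
        have hPnd : (T.filter (fun v => !rem.contains v)).Nodup := hT.filter _
        have hperm := List.perm_cons_erase hxP
        rw [numElimGo, if_pos (by simp [hxT, hxr]), hadd, ih (rem ++ [x]),
            foldl_erase_perm hperm, List.foldl_cons, List.erase_cons_head]
        congr 1
        rw [hPnd.erase_eq_filter, List.filter_filter]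
        apply List.filter_congr
        intro v _
        by_cases hv : v = x
        · subst hv; simp
        · simp [hv]
    · have hxP : x ∉ T.filter (fun v => !rem.contains v) := by
        simp [List.mem_filter, hxT]
      rw [numElimGo, if_neg (by simp [hxT]), ih rem,
          foldl_erase_not_mem _ _ _ hxP]

theorem numElim_alt_eq_fold (posN l : List Int) :
    numElim_alt posN l
      = ((PySem.Set.inter (PySem.Set.ofList l) (PySem.Set.ofList (PySem.List.pyRange 1 10 1))) :
          List Int).foldl (fun ns v => ns.erase v) posN := by
  unfold numElim_alt
  rw [numElimGo_eq_fold _ (PySem.Set.nodup_inter _ _ (PySem.Set.nodup_ofList l)) posN PySem.Set.empty]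
  congr 1
  simp [PySem.Set.empty, List.filter_true]

-- ===== VERDICT (by name: the statement is the Claim_ definition above) =====
theorem numElim_spec : Claim_equal_numElim := by
  intro posN l _
  unfold Spec_numElim
  rw [numElim_eq_fold, numElim_alt_eq_fold]
  apply foldl_erase_perm
  have hnd1 : ((PySem.List.pyRange 1 10 1).filter (fun v => l.contains v)).Nodup :=
    (PySem.List.nodup_pyRange_one 1 10).filter _
  have hnd2 : ((PySem.Set.inter (PySem.Set.ofList l)
      (PySem.Set.ofList (PySem.List.pyRange 1 10 1))) : List Int).Nodup :=
    PySem.Set.nodup_inter _ _ (PySem.Set.nodup_ofList l)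
  rw [List.perm_ext_iff_of_nodup hnd1 hnd2]
  intro v
  simp [List.mem_filter, PySem.Set.mem_inter, PySem.Set.mem_ofList]
  tauto
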